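-- pv_equiv track=rewrite | github.com/Lord0fTurk/RPGMLocalizer | src/core/parsers/js_tokenizer.py | _is_in_path_constructor
-- ===== SOURCE A (Python) =====
-- def _is_in_path_constructor(js_code: str, string_start: int) -> bool:
--     """Return True when a string is used in path/URL construction."""
--     prefix = js_code[max(0, string_start - 32):string_start].lower()
--     compact = "".join(prefix.split())
--     markers = (
--         'path.join(',
--         'path.resolve(',
--         'path.normalize(',
--         'path.basename(',
--         'path.dirname(',
--         'path.extname(',
--         'newurl(',
--         'url(',
--     )
--     for marker in markers:
--         marker_pos = compact.rfind(marker)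
--         if marker_pos == -1:
--             continue
--         if ')' not in compact[marker_pos:]:
--             return True
--     return False
-- ===== SOURCE B (Python) =====
-- def _is_in_path_constructor(js_code: str, string_start: int) -> bool:
--     """Return True when a string is used in path/URL construction."""
--     prefix = js_code[max(0, string_start - 32):string_start].lower()
--     compact = "".join(prefix.split())
--     markers = (
--         'path.join(',
--         'path.resolve(',
--         'path.normalize(',
--         'path.basename(',
--         'path.dirname(',
--         'path.extname(',
--         'newurl(',
--         'url(',
--     )
--     # single left-to-right scan: a ')' clears the flag, a '(' closing a marker sets it;
--     # at the end the flag says whether some marker occurrence has no ')' after it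
--     found = False
--     for i, ch in enumerate(compact):
--         if ch == ')':
--             found = False
--         elif ch == '(' and any(compact.endswith(m, 0, i + 1) for m in markers):
--             found = True
--     return found
-- ===== Notes on version B (the rewrite author's own statement) =====
-- stated objective: alternative
-- what changed: A makes a backward rfind pass per marker and re-scans each suffix for ')'; B is a single left-to-right scan of the compacted window with a boolean flag that a ')' clears and a marker-closing '(' sets, so no rfind/suffix search remains.
import Mathlib
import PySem

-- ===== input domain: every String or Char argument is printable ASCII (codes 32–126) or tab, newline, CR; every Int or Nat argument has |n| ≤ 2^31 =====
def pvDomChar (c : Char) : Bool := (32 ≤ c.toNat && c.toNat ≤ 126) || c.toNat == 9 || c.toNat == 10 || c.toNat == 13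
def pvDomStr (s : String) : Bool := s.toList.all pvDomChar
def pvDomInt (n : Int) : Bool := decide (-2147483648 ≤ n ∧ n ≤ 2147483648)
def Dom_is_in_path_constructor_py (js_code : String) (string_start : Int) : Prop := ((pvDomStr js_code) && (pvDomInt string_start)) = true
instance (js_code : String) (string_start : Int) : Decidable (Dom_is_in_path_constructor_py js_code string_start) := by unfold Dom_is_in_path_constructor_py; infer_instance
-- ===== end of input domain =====

-- B replaces A's per-marker backward rfind passes (each with a ')' re-scan of the suffix) by one
-- forward scan of the compacted window with a flag a ')' clears and a marker-closing '(' sets.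

-- the marker tuple, shared literal data of both programs
def pvMarkers : List (List Char) :=
  ["path.join(".toList, "path.resolve(".toList, "path.normalize(".toList,
   "path.basename(".toList, "path.dirname(".toList, "path.extname(".toList,
   "newurl(".toList, "url(".toList]

-- ===== PORT A =====
-- A's 'for marker in markers: … continue / return True' loop
def pvLoopA (compact : List Char) : List (List Char) → Bool
  | [] => false
  | m :: ms =>
    let marker_pos := PySem.Chars.rfind compact m
    if marker_pos = -1 then pvLoopA compact ms
    else if PySem.Chars.isIn [')'] (PySem.Chars.slice compact (some marker_pos) none) = false then true
    else pvLoopA compact ms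

def is_in_path_constructor_py (js_code : String) (string_start : Int) : Bool :=
  let pfx := PySem.Chars.lower (PySem.List.slice js_code.toList (some (max 0 (string_start - 32))) (some string_start))
  let compact := PySem.Chars.join [] (PySem.Chars.split₀ pfx)
  pvLoopA compact pvMarkers

-- ===== PORT B =====
-- B's loop body; compact.endswith(m, 0, i+1) is ported as endswith of compact[:i+1]
-- (exact, since start is 0 and Python clamps the end bound, and here i+1 ≤ len(compact))
def pvScanStep (compact : List Char) (found : Bool) (pr : Int × Char) : Bool :=
  if pr.2 = ')' then false
  else if pr.2 = '(' ∧ pvMarkers.any (fun m => PySem.Chars.endswith (compact.take (pr.1.toNat + 1)) m) = true then true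
  else found

def is_in_path_constructor_py_alt (js_code : String) (string_start : Int) : Bool :=
  let pfx := PySem.Chars.lower (PySem.List.slice js_code.toList (some (max 0 (string_start - 32))) (some string_start))
  let compact := PySem.Chars.join [] (PySem.Chars.split₀ pfx)
  (PySem.List.enumerate compact).foldl (pvScanStep compact) false

-- ===== PRECONDITION & SPEC =====
def Spec_is_in_path_constructor_py (js_code : String) (string_start : Int) (out : Bool) : Prop := out = is_in_path_constructor_py_alt js_code string_start
instance (js_code : String) (string_start : Int) (out : Bool) : Decidable (Spec_is_in_path_constructor_py js_code string_start out) := by unfold Spec_is_in_path_constructor_py; infer_instance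

-- ===== CLAIM (what is proved, stated in full; the proofs are below) =====
def Claim_equal_is_in_path_constructor_py : Prop := ∀ (js_code : String) (string_start : Int), Dom_is_in_path_constructor_py js_code string_start → Spec_is_in_path_constructor_py js_code string_start (is_in_path_constructor_py js_code string_start)

-- ===== LEMMAS AND PROOFS =====

-- proof-side abbreviation: the part of compact after its last ')' (whole string if none), via rfind
def pvTail (compact : List Char) : List Char :=
  let r := PySem.Chars.rfind compact [')']
  if r = -1 then compact else compact.drop (r.toNat + 1)

-- rfind.go s sub j returns the largest p ≤ j where sub is a prefix of s.drop p, else -1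
theorem pv_go_spec (s sub : List Char) (j : Nat) :
    (PySem.Chars.rfind.go s sub j = -1 ∧ ∀ p ≤ j, ¬ sub <+: s.drop p) ∨
    (∃ p : Nat, p ≤ j ∧ PySem.Chars.rfind.go s sub j = (p : Int) ∧ sub <+: s.drop p ∧
      ∀ q, p < q → q ≤ j → ¬ sub <+: s.drop q) := by
  induction j with
  | zero =>
    by_cases h : sub <+: s
    · right
      refine ⟨0, le_refl 0, ?_, by simpa using h, fun q hq hq' => absurd (lt_of_lt_of_le hq hq') (lt_irrefl 0)⟩
      simp [PySem.Chars.rfind.go, List.isPrefixOf_iff_prefix, h]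
    · left
      refine ⟨by simp [PySem.Chars.rfind.go, List.isPrefixOf_iff_prefix, h], ?_⟩
      intro p hp
      have : p = 0 := Nat.le_zero.mp hp
      subst this; simpa using h
  | succ j ih =>
    by_cases h : sub <+: s.drop (j+1)
    · right
      refine ⟨j+1, le_refl _, ?_, h, fun q hq hq' => by omega⟩
      push_cast
      simp [PySem.Chars.rfind.go, List.isPrefixOf_iff_prefix, h]
    · have hgo : PySem.Chars.rfind.go s sub (j+1) = PySem.Chars.rfind.go s sub j := by
        simp [PySem.Chars.rfind.go, List.isPrefixOf_iff_prefix, h]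
      rcases ih with ⟨h1, h2⟩ | ⟨p, hp, he, hpre, hmax⟩
      · left
        refine ⟨hgo.trans h1, fun p hp => ?_⟩
        rcases Nat.lt_or_ge p (j+1) with h' | h'
        · exact h2 p (by omega)
        · have : p = j + 1 := by omega
          subst this; exact h
      · right
        refine ⟨p, by omega, hgo.trans he, hpre, fun q hq hq' => ?_⟩
        rcases Nat.lt_or_ge q (j+1) with h' | h'
        · exact hmax q hq (by omega)
        · have : q = j + 1 := by omega
          subst this; exact h

-- rfind finds the LAST occurrence (or -1 when there is none)
theorem pv_rfind_spec (s sub : List Char) :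
    (PySem.Chars.rfind s sub = -1 ∧ ∀ p, ¬ sub <+: s.drop p) ∨
    (∃ p : Nat, p ≤ s.length ∧ PySem.Chars.rfind s sub = (p : Int) ∧ sub <+: s.drop p ∧
      ∀ q, p < q → q ≤ s.length → ¬ sub <+: s.drop q) := by
  have hdef : PySem.Chars.rfind s sub = PySem.Chars.rfind.go s sub s.length := rfl
  rcases pv_go_spec s sub s.length with ⟨h1, h2⟩ | ⟨p, hp, he, hpre, hmax⟩
  · left
    refine ⟨hdef.trans h1, fun p hc => ?_⟩
    by_cases hle : p ≤ s.length
    · exact h2 p hle hc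
    · have hnil : s.drop p = [] := List.drop_eq_nil_iff.mpr (by omega)
      rw [hnil] at hc
      have hsub : sub = [] := List.prefix_nil.mp hc
      exact h2 s.length (le_refl _) (by simp [hsub])
  · right
    exact ⟨p, hp, hdef.trans he, hpre, hmax⟩

-- a ')' occurrence is a real index of the list
theorem pv_paren_lt (l : List Char) (p : Nat) (h : [')'] <+: l.drop p) : p < l.length := by
  by_contra hc
  have hnil : l.drop p = [] := List.drop_eq_nil_iff.mpr (by omega)
  rw [hnil] at h
  simpa using List.prefix_nil.mp h

-- the heart of the A side: A's per-marker test (last occurrence followed by no ')') equals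
-- "the marker occurs in the tail after the last ')'"
theorem pv_key (compact m : List Char) :
    (PySem.Chars.rfind compact m ≠ -1 ∧
     PySem.Chars.isIn [')'] (PySem.Chars.slice compact (some (PySem.Chars.rfind compact m)) none) = false)
    ↔ PySem.Chars.isIn m (pvTail compact) = true := by
  rcases pv_rfind_spec compact [')'] with ⟨hr1, hr2⟩ | ⟨k, hk, hre, hkpre, hkmax⟩
  · -- no ')' in compact at all: tail = compact
    have htail : pvTail compact = compact := by simp [pvTail, hr1]
    rw [htail]
    constructor
    · rintro ⟨hne, -⟩
      rcases pv_rfind_spec compact m with ⟨h1, -⟩ | ⟨u, -, -, hupre, -⟩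
      · exact absurd h1 hne
      · exact (PySem.Chars.exists_prefix_drop_iff_isIn m compact).mp ⟨u, hupre⟩
    · intro ht
      obtain ⟨j, hj⟩ := (PySem.Chars.exists_prefix_drop_iff_isIn m compact).mpr ht
      rcases pv_rfind_spec compact m with ⟨-, h2⟩ | ⟨u, -, he, -, -⟩
      · exact absurd hj (h2 j)
      · refine ⟨by rw [he]; intro hc; omega, ?_⟩
        rw [he]
        simp only [PySem.Chars.slice_eq_listSlice, PySem.List.slice_from_natCast]
        cases hb : PySem.Chars.isIn [')'] (compact.drop u) with
        | false => rfl
        | true =>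
          exfalso
          obtain ⟨jj, hjj⟩ := (PySem.Chars.exists_prefix_drop_iff_isIn _ _).mpr hb
          rw [List.drop_drop] at hjj
          exact hr2 (u + jj) hjj
  · -- last ')' at index k: tail = compact.drop (k+1)
    have hklen : k < compact.length := pv_paren_lt compact k hkpre
    have htail : pvTail compact = compact.drop (k+1) := by
      simp [pvTail, hre]
    rw [htail]
    constructor
    · rintro ⟨hne, hfalse⟩
      rcases pv_rfind_spec compact m with ⟨h1, -⟩ | ⟨u, -, he, hupre, -⟩
      · exact absurd h1 hne
      · rw [he] at hfalse
        simp only [PySem.Chars.slice_eq_listSlice, PySem.List.slice_from_natCast] at hfalse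
        have hk1u : k + 1 ≤ u := by
          by_contra hlt
          have hocc : [')'] <+: (compact.drop u).drop (k - u) := by
            rw [List.drop_drop]
            have h' : u + (k - u) = k := by omega
            rw [h']; exact hkpre
          have := (PySem.Chars.exists_prefix_drop_iff_isIn [')'] (compact.drop u)).mp ⟨k - u, hocc⟩
          rw [hfalse] at this
          exact Bool.false_ne_true this
        apply (PySem.Chars.exists_prefix_drop_iff_isIn m (compact.drop (k+1))).mp
        refine ⟨u - (k+1), ?_⟩
        rw [List.drop_drop]
        have h' : k + 1 + (u - (k + 1)) = u := by omega
        rw [h']; exact hupre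
    · intro ht
      obtain ⟨j, hj⟩ := (PySem.Chars.exists_prefix_drop_iff_isIn m _).mpr ht
      rw [List.drop_drop] at hj
      have hq' : ∃ q', k + 1 ≤ q' ∧ q' ≤ compact.length ∧ m <+: compact.drop q' := by
        by_cases hle : k + 1 + j ≤ compact.length
        · exact ⟨k + 1 + j, by omega, hle, hj⟩
        · have hnil : compact.drop (k + 1 + j) = [] := List.drop_eq_nil_iff.mpr (by omega)
          rw [hnil] at hj
          have hm : m = [] := List.prefix_nil.mp hj
          exact ⟨compact.length, by omega, le_refl _, by simp [hm]⟩
      obtain ⟨q', hq1, hq2, hq3⟩ := hq'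
      rcases pv_rfind_spec compact m with ⟨-, h2⟩ | ⟨u, -, he, -, humax⟩
      · exact absurd hq3 (h2 q')
      · have huq : q' ≤ u := by
          by_contra hlt
          exact humax q' (by omega) hq2 hq3
        refine ⟨by rw [he]; intro hc; omega, ?_⟩
        rw [he]
        simp only [PySem.Chars.slice_eq_listSlice, PySem.List.slice_from_natCast]
        cases hb : PySem.Chars.isIn [')'] (compact.drop u) with
        | false => rfl
        | true =>
          exfalso
          obtain ⟨jj, hjj⟩ := (PySem.Chars.exists_prefix_drop_iff_isIn _ _).mpr hb
          rw [List.drop_drop] at hjj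
          have hlt := pv_paren_lt compact (u + jj) hjj
          exact hkmax (u + jj) (by omega) (by omega) hjj

-- A's loop over the markers is 'any marker occurs in the tail after the last ')''
theorem pv_loopA_eq (compact : List Char) (ms : List (List Char)) :
    pvLoopA compact ms = ms.any (fun m => PySem.Chars.isIn m (pvTail compact)) := by
  induction ms with
  | nil => rfl
  | cons m ms ih =>
    rw [List.any_cons]
    show (if PySem.Chars.rfind compact m = -1 then pvLoopA compact ms
          else if PySem.Chars.isIn [')'] (PySem.Chars.slice compact (some (PySem.Chars.rfind compact m)) none) = false
          then true else pvLoopA compact ms) = _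
    split_ifs with h1 h2
    · have hfalse : PySem.Chars.isIn m (pvTail compact) = false := by
        cases hb : PySem.Chars.isIn m (pvTail compact) with
        | false => rfl
        | true => exact absurd h1 ((pv_key compact m).mpr hb).1
      rw [hfalse, Bool.false_or, ih]
    · rw [(pv_key compact m).mp ⟨h1, h2⟩, Bool.true_or]
    · have hfalse : PySem.Chars.isIn m (pvTail compact) = false := by
        cases hb : PySem.Chars.isIn m (pvTail compact) with
        | false => rfl
        | true => exact absurd ((pv_key compact m).mpr hb).2 h2
      rw [hfalse, Bool.false_or, ih]

-- ----- the B side -----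

-- the non-')' predicate of the scan
def pvP (c : Char) : Bool := decide (c ≠ ')')

-- facts about the marker literals, checked by computation
theorem pv_markers_facts_b :
    pvMarkers.all (fun m => (m.getLast? == some '(') && m.all pvP) = true := by rfl

-- facts about the marker literals the scan equivalence uses
theorem pv_markers_facts :
    ∀ m ∈ pvMarkers, m ≠ [] ∧ m.getLast? = some '(' ∧ ∀ a ∈ m, pvP a = true := by
  intro m hm
  have hb := List.all_eq_true.mp pv_markers_facts_b m hm
  rw [Bool.and_eq_true, beq_iff_eq] at hb
  obtain ⟨h1, h2⟩ := hb
  refine ⟨?_, h1, fun a ha => List.all_eq_true.mp h2 a ha⟩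
  intro hnil
  rw [hnil] at h1
  simp at h1

-- a prefix all of whose elements satisfy p is a prefix of takeWhile p
theorem pv_prefix_takeWhile (p : Char → Bool) (m : List Char) :
    ∀ x : List Char, m <+: x → (∀ a ∈ m, p a = true) → m <+: x.takeWhile p := by
  induction m with
  | nil => intro x _ _; exact List.nil_prefix
  | cons a m ih =>
    intro x h hall
    obtain ⟨t, rfl⟩ := h
    have hpa : p a = true := hall a List.mem_cons_self
    rw [List.cons_append, List.takeWhile_cons, hpa]
    simp only [if_true]
    exact List.cons_prefix_cons.mpr ⟨rfl, ih _ ⟨t, rfl⟩ (fun b hb => hall b (List.mem_cons_of_mem a hb))⟩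

-- a suffix all of whose elements satisfy p is a suffix of rtakeWhile p
theorem pv_suffix_rtakeWhile (p : Char → Bool) (m x : List Char)
    (h : m <:+ x) (hall : ∀ a ∈ m, p a = true) : m <:+ x.rtakeWhile p := by
  rw [← List.reverse_prefix] at h ⊢
  rw [List.rtakeWhile, List.reverse_reverse]
  exact pv_prefix_takeWhile p m.reverse x.reverse h (fun a ha => hall a (List.mem_reverse.mp ha))

-- rtakeWhile past an element that fails p: only the all-p tail after it remains
theorem pv_rtakeWhile_middle (p : Char → Bool) (u : List Char) (x : Char) (hx : p x = false) :
    ∀ v : List Char, (∀ a ∈ v, p a = true) → (u ++ x :: v).rtakeWhile p = v := by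
  intro v
  induction v using List.reverseRecOn with
  | nil =>
    intro _
    have : u ++ [x] = u ++ x :: ([] : List Char) := by simp
    rw [← this, List.rtakeWhile_concat_neg p u x (by simp [hx])]
  | append_singleton v a ihv =>
    intro hall
    have h1 : u ++ x :: (v ++ [a]) = (u ++ x :: v) ++ [a] := by simp
    rw [h1, List.rtakeWhile_concat_pos p _ a (hall a (by simp)),
        ihv (fun b hb => hall b (by simp [hb]))]

-- the rfind-tail is rtakeWhile of the non-')' predicate
theorem pv_tail_eq_rtakeWhile (l : List Char) : pvTail l = l.rtakeWhile pvP := by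
  rcases pv_rfind_spec l [')'] with ⟨hr1, hr2⟩ | ⟨k, hk, hre, hkpre, hkmax⟩
  · have h1 : pvTail l = l := by simp [pvTail, hr1]
    rw [h1]
    symm
    apply List.rtakeWhile_eq_self_iff.mpr
    intro a ha
    obtain ⟨j, hj, hja⟩ := List.getElem_of_mem ha
    by_contra hpa
    have haeq : a = ')' := by
      simp only [pvP, decide_eq_true_eq] at hpa
      exact not_not.mp (fun hne => hpa hne)
    have : [')'] <+: l.drop j := by
      rw [List.drop_eq_getElem_cons hj, hja, haeq]
      exact ⟨l.drop (j+1), rfl⟩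
    exact hr2 j this
  · have hklen : k < l.length := pv_paren_lt l k hkpre
    have h1 : pvTail l = l.drop (k+1) := by simp [pvTail, hre]
    obtain ⟨t, ht⟩ := hkpre
    have hdk : l.drop k = ')' :: t := ht.symm
    have hdk1 : l.drop (k+1) = t := by
      have h2 : List.drop 1 (List.drop k l) = List.drop (k + 1) l := List.drop_drop
      rw [hdk] at h2
      simpa using h2.symm
    have hall : ∀ a ∈ t, pvP a = true := by
      intro a ha
      obtain ⟨j, hj, hja⟩ := List.getElem_of_mem ha
      by_contra hpa
      have haeq : a = ')' := by
        simp only [pvP, decide_eq_true_eq] at hpa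
        exact not_not.mp (fun hne => hpa hne)
      have hdrop : l.drop (k + 1 + j) = a :: t.drop (j+1) := by
        have h2 : List.drop j (List.drop (k+1) l) = List.drop (k + 1 + j) l := List.drop_drop
        rw [hdk1, List.drop_eq_getElem_cons hj, hja] at h2
        exact h2.symm
      have hocc : [')'] <+: l.drop (k + 1 + j) := by
        rw [hdrop, haeq]; exact ⟨_, rfl⟩
      have hlen : k + 1 + j ≤ l.length := by
        have : t.length = l.length - (k+1) := by rw [← hdk1, List.length_drop]
        omega
      exact hkmax (k + 1 + j) (by omega) hlen hocc
    have hsplit : l = (l.take k) ++ ')' :: t := by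
      rw [← hdk, List.take_append_drop]
    rw [h1, hdk1]
    rw [hsplit] at *
    exact (pv_rtakeWhile_middle pvP (l.take k) ')' (by simp [pvP]) t hall).symm

-- occurrences in t ++ [c]: inside t, or a suffix ending at c
theorem pv_infix_concat (m t : List Char) (c : Char) :
    m <:+: t ++ [c] ↔ m <:+: t ∨ m <:+ t ++ [c] := by
  constructor
  · rintro ⟨s, t', he⟩
    rcases List.eq_nil_or_concat t' with rfl | ⟨t'', c', rfl⟩
    · right; exact ⟨s, by simpa using he⟩
    · left
      have h2 : (s ++ m ++ t'') ++ [c'] = t ++ [c] := by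
        simpa [List.concat_eq_append, List.append_assoc] using he
      exact ⟨s, t'', (List.append_inj' h2 rfl).1⟩
  · rintro (h | h)
    · obtain ⟨s, t', rfl⟩ := h
      exact ⟨s, t' ++ [c], by simp⟩
    · exact h.isInfix

-- per-marker step: occurrence in the new tail = old occurrence, or c closes the marker now
theorem pv_isIn_step (l : List Char) (c : Char) (hc : pvP c = true) (m : List Char)
    (hm : m ≠ []) (hlast : m.getLast? = some '(') (hallm : ∀ a ∈ m, pvP a = true) :
    (PySem.Chars.isIn m (l.rtakeWhile pvP ++ [c]) = true) ↔
      (PySem.Chars.isIn m (l.rtakeWhile pvP) = true ∨ (c = '(' ∧ m <:+ l ++ [c])) := by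
  rw [PySem.Chars.isIn_iff_infix, PySem.Chars.isIn_iff_infix, pv_infix_concat]
  constructor
  · rintro (h | h)
    · exact Or.inl h
    · right
      have hsl : l.rtakeWhile pvP ++ [c] <:+ l ++ [c] := by
        obtain ⟨s, hs⟩ := List.rtakeWhile_suffix (l := l) (p := pvP)
        exact ⟨s, by rw [← List.append_assoc, hs]⟩
      have hsuf : m <:+ l ++ [c] := h.trans hsl
      refine ⟨?_, hsuf⟩
      obtain ⟨s, hs⟩ := h
      have hgl : (s ++ m).getLast? = some c := by rw [hs]; simp
      rw [List.getLast?_append_of_ne_nil s hm, hlast] at hgl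
      exact (Option.some.inj hgl).symm
  · rintro (h | ⟨hc', hsuf⟩)
    · exact Or.inl h
    · right
      have : m <:+ (l ++ [c]).rtakeWhile pvP := pv_suffix_rtakeWhile pvP m (l ++ [c]) hsuf hallm
      rwa [List.rtakeWhile_concat_pos pvP l c hc] at this

-- B's scan over enumerate(compact) computes 'any marker occurs after the last ')''
theorem pv_scan_eq (compact : List Char) :
    (PySem.List.enumerate compact).foldl (pvScanStep compact) false
      = pvMarkers.any (fun m => PySem.Chars.isIn m (compact.rtakeWhile pvP)) := by
  induction compact using List.reverseRecOn with
  | nil => rfl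
  | append_singleton l c ih =>
    rw [PySem.List.enumerate_append, List.foldl_append]
    have hcongr : (PySem.List.enumerate l).foldl (pvScanStep (l ++ [c])) false
        = (PySem.List.enumerate l).foldl (pvScanStep l) false := by
      apply PySem.List.foldl_congr_mem
      intro acc x hx
      obtain ⟨k, hk, rfl⟩ := (PySem.List.mem_enumerate_iff _ _ _).mp hx
      show pvScanStep (l ++ [c]) acc (0 + (k : Int), l[k]) = pvScanStep l acc (0 + (k : Int), l[k])
      have htoNat : ((0 + (k : Int)).toNat + 1) = k + 1 := by omega
      have htake : (l ++ [c]).take ((0 + (k : Int)).toNat + 1) = l.take ((0 + (k : Int)).toNat + 1) := by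
        rw [htoNat]
        exact List.take_append_of_le_length (by omega)
      simp only [pvScanStep, htake]
    rw [hcongr, ih]
    have henum1 : PySem.List.enumerate [c] (0 + l.length) = [((0 + (l.length : Int)), c)] := rfl
    rw [henum1, List.foldl_cons, List.foldl_nil]
    have htake : (l ++ [c]).take ((0 + (l.length : Int)).toNat + 1) = l ++ [c] := by
      have : ((0 + (l.length : Int)).toNat + 1) = (l ++ [c]).length := by
        simp
      rw [this, List.take_length]
    by_cases hc : c = ')'
    · subst hc
      have : (l ++ [')']).rtakeWhile pvP = [] :=
        List.rtakeWhile_concat_neg pvP l ')' (by simp [pvP])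
      rw [this]
      have hval : pvScanStep (l ++ [')']) (pvMarkers.any fun m => PySem.Chars.isIn m (l.rtakeWhile pvP)) ((0 + (l.length : Int)), ')') = false := by
        simp [pvScanStep]
      rw [hval]
      decide
    · have hcP : pvP c = true := by simp [pvP, hc]
      rw [List.rtakeWhile_concat_pos pvP l c hcP]
      show pvScanStep (l ++ [c]) (pvMarkers.any fun m => PySem.Chars.isIn m (l.rtakeWhile pvP)) ((0 + (l.length : Int)), c) = _
      simp only [pvScanStep, htake, if_neg hc]
      rw [Bool.eq_iff_iff]
      constructor
      · intro h
        split_ifs at h with hcond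
        · obtain ⟨hcpar, hany⟩ := hcond
          obtain ⟨m, hmm, hend⟩ := List.any_eq_true.mp hany
          apply List.any_eq_true.mpr
          refine ⟨m, hmm, ?_⟩
          obtain ⟨hm1, hm2, hm3⟩ := pv_markers_facts m hmm
          apply (pv_isIn_step l c hcP m hm1 hm2 hm3).mpr
          exact Or.inr ⟨hcpar, (PySem.Chars.endswith_iff _ _).mp hend⟩
        · obtain ⟨m, hmm, hin⟩ := List.any_eq_true.mp h
          apply List.any_eq_true.mpr
          refine ⟨m, hmm, ?_⟩
          obtain ⟨hm1, hm2, hm3⟩ := pv_markers_facts m hmm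
          exact (pv_isIn_step l c hcP m hm1 hm2 hm3).mpr (Or.inl hin)
      · intro h
        obtain ⟨m, hmm, hin⟩ := List.any_eq_true.mp h
        obtain ⟨hm1, hm2, hm3⟩ := pv_markers_facts m hmm
        rcases (pv_isIn_step l c hcP m hm1 hm2 hm3).mp hin with hold | ⟨hcpar, hsuf⟩
        · split_ifs
          · rfl
          · exact List.any_eq_true.mpr ⟨m, hmm, hold⟩
        · rw [if_pos ⟨hcpar, List.any_eq_true.mpr ⟨m, hmm, (PySem.Chars.endswith_iff _ _).mpr hsuf⟩⟩]

-- ===== VERDICT (by name: the statement is the Claim_ definition above) =====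
theorem is_in_path_constructor_py_spec : Claim_equal_is_in_path_constructor_py := by
  intro js_code string_start _
  unfold Spec_is_in_path_constructor_py is_in_path_constructor_py is_in_path_constructor_py_alt
  rw [pv_loopA_eq, pv_scan_eq, pv_tail_eq_rtakeWhile]
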